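-- pv_equiv track=rewrite | github.com/CloudCoders/AdventOfCode2017 | llorens/day09/Day09Solver.py | clean_stream
-- ===== SOURCE A (Python) =====
-- def is_valid_char(j, sequence):
--     valid = True
--
--     for i in range(j-1, -1, -1):
--         if sequence[i] == "!":
--             if valid:
--                 valid = False
--             else:
--                 valid = True
--         else:
--             return valid
--
-- def clean_stream(sequence):
--
--     num_valid_chars = 0
--     i = 0
--     while i < len(sequence):
--         if sequence[i] == '<':
--
--             j = i+1
--             while j < len(sequence):
--                 if sequence[j] == '>' and is_valid_char(j, sequence):
--                     sequence = sequence[:i] + sequence[j+1:]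
--                     break
--                 else:
--                     if sequence[j] != '!' and is_valid_char(j, sequence):
--                         num_valid_chars += 1
--                 j += 1
--
--         i += 1
--
--     return sequence, num_valid_chars
-- ===== SOURCE B (Python) =====
-- def clean_stream(sequence):
--     out = []
--     num_valid_chars = 0
--     in_garbage = False
--     escaped = False
--     for ch in sequence:
--         if in_garbage:
--             if escaped:
--                 escaped = False
--             elif ch == '!':
--                 escaped = True
--             elif ch == '>':
--                 in_garbage = False
--             else:
--                 num_valid_chars += 1
--         elif ch == '<':
--             in_garbage = True
--         else:
--             out.append(ch)
--     return ''.join(out), num_valid_chars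
-- ===== Notes on version B (the rewrite author's own statement) =====
-- stated objective: faster
-- what changed: Replaced A's index-driven remove-and-restart loop (which rescans backwards at every position to decide escape parity and splices the string for each closed garbage section) by a single left-to-right state machine with in-garbage and escape flags that builds the output in one pass.
-- intended difference: On well-formed streams where a garbage section's closing '>' is immediately followed by '<', A's index steps past the splice point and skips that '<', so the following garbage section is kept verbatim in the output and not counted; B removes and counts every garbage section, which is the intended cleaning. — e.g. on clean_stream("<><>"): A returns ("<>", 0), B returns ("", 0)
-- outside the precondition, e.g. on clean_stream('<'): A returns ('<', 0), B returns ('', 0); on clean_stream('<a'): A returns ('<a', 1), B returns ('', 1); on clean_stream('<a<b'): A returns ('<a<b', 4), B returns ('', 3)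
import Mathlib
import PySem

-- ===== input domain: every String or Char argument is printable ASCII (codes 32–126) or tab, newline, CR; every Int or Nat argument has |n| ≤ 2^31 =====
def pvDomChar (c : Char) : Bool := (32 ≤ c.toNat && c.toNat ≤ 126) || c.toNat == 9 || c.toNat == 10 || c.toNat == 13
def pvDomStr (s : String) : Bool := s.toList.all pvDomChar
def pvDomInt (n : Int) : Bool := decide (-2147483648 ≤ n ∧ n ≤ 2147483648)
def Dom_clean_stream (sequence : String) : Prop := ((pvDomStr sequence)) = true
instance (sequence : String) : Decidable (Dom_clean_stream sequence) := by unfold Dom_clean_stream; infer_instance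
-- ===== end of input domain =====

-- B replaces A's index-driven remove-and-restart loop by one left-to-right state machine
-- (in-garbage / escape flags) building the output in a single pass; equal on well-formed
-- streams except the stated D_ corner.

-- ===== PORT A =====

-- is_valid_char's backward scan: `isValidFrom s n v` is the Python loop with current index n-1
-- (n = 0: the range is exhausted, Python returns None).
def isValidFrom (s : List Char) : Nat → Bool → Option Bool
  | 0, _ => none
  | i + 1, valid => if s.getD i ' ' == '!' then isValidFrom s i (!valid) else some valid

def is_valid_char (j : Nat) (s : List Char) : Option Bool := isValidFrom s j true

-- the inner `while j < len(sequence)` loop, made total by a fuel counter (fuel = len(sequence)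
-- at the call site always suffices: j starts at i+1 ≥ 1 and increases each step); result:
-- (index of the found valid '>' if any, updated num_valid_chars); Python truthiness of
-- is_valid_char's Optional[bool] is `== some true`.
def innerLoopF (s : List Char) : Nat → Nat → Int → Option Nat × Int
  | 0, _, cnt => (none, cnt)
  | fuel + 1, j, cnt =>
    if j < s.length then
      if s.getD j ' ' == '>' && (is_valid_char j s == some true) then (some j, cnt)
      else
        innerLoopF s fuel (j + 1)
          (if s.getD j ' ' != '!' && (is_valid_char j s == some true) then cnt + 1 else cnt)
    else (none, cnt)

-- the outer `while i < len(sequence)` loop (fuel = len(sequence)+1 suffices: i increases each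
-- step and the string never grows); on a found valid '>' the string is spliced
-- (sequence[:i] + sequence[j+1:]) and i still advances, exactly as in Python.
def outerLoopF : Nat → List Char → Nat → Int → List Char × Int
  | 0, s, _, cnt => (s, cnt)
  | fuel + 1, s, i, cnt =>
    if i < s.length then
      if s.getD i ' ' == '<' then
        match innerLoopF s s.length (i + 1) cnt with
        | (some j, cnt') => outerLoopF fuel (s.take i ++ s.drop (j + 1)) (i + 1) cnt'
        | (none, cnt') => outerLoopF fuel s (i + 1) cnt'
      else outerLoopF fuel s (i + 1) cnt
    else (s, cnt)

def clean_stream (sequence : String) : String × Int :=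
  let r := outerLoopF (sequence.toList.length + 1) sequence.toList 0 0
  (String.ofList r.1, r.2)

-- ===== PORT B =====

-- Source B's single for-loop: state (in_garbage, escaped), output list `out`, counter.
def altGo : List Char → Bool → Bool → List Char → Int → List Char × Int
  | [], _, _, out, cnt => (out, cnt)
  | ch :: rest, in_g, esc, out, cnt =>
    if in_g then
      if esc then altGo rest true false out cnt
      else if ch == '!' then altGo rest true true out cnt
      else if ch == '>' then altGo rest false false out cnt
      else altGo rest true esc out (cnt + 1)
    else if ch == '<' then altGo rest true false out cnt
    else altGo rest false esc (out ++ [ch]) cnt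

def clean_stream_alt (sequence : String) : String × Int :=
  let r := altGo sequence.toList false false [] 0
  (String.ofList r.1, r.2)

-- ===== PRECONDITION & SPEC =====

-- recognizer for well-formed streams: scan with (in_garbage, escape) state; well-formed iff
-- the scan does not end inside a garbage section.
def wfScan : List Char → Bool → Bool → Bool
  | [], in_g, _ => !in_g
  | c :: rest, in_g, esc =>
    if in_g then
      if esc then wfScan rest true false
      else if c = '!' then wfScan rest true true
      else if c = '>' then wfScan rest false false
      else wfScan rest true false
    else wfScan rest (c = '<') false

-- Pre_ restricts to well-formed streams (the puzzle's input format: every garbage section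
-- opened by '<' is closed by an unescaped '>'). On a malformed stream with an unterminated
-- garbage section A returns the unterminated tail verbatim and re-counts its characters once
-- per '<' occurring inside it, while B drops the tail and counts each character once.
def Pre_clean_stream (sequence : String) : Prop := wfScan sequence.toList false false = true
instance (sequence : String) : Decidable (Pre_clean_stream sequence) := by
  unfold Pre_clean_stream; infer_instance

def pvWitness_clean_stream : String := "ab<c!>d>e"

-- D_'s detector: a 5-state automaton over the input characters (0 outside garbage, 1 inside,
-- 2 escaped, 3 just closed a garbage section, 4 = pattern found, absorbing)
def dstep (n : Nat) (c : Char) : Nat :=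
  if n = 4 then 4
  else if n = 2 then 1
  else if n = 1 then if c == '>' then 3 else if c == '!' then 2 else 1
  else if c == '<' then if n = 3 then 4 else 1
  else 0

-- On well-formed streams where a garbage section's closing unescaped '>' is immediately
-- followed by '<', A's index steps past the splice point and skips that '<', keeping the next
-- garbage section verbatim in the output and uncounted; B removes and counts every garbage
-- section — the intended cleaning.
def D_clean_stream (sequence : String) : Prop := sequence.toList.foldl dstep 0 = 4
instance (sequence : String) : Decidable (D_clean_stream sequence) := by
  unfold D_clean_stream; infer_instance

def Spec_clean_stream (sequence : String) (out : String × Int) : Prop :=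
  ¬ D_clean_stream sequence → out = clean_stream_alt sequence
instance (sequence : String) (out : String × Int) : Decidable (Spec_clean_stream sequence out) := by
  unfold Spec_clean_stream; infer_instance

def pvDiffWitness_clean_stream : String := "<><>"
def pvDiffWitnessOut_clean_stream : (String × Int) × (String × Int) := (("<>", 0), ("", 0))

-- ===== CLAIM (what is proved, stated in full; the proofs are below) =====
def Claim_unchanged_clean_stream : Prop := ∀ (sequence : String), Dom_clean_stream sequence → Pre_clean_stream sequence → Spec_clean_stream sequence (clean_stream sequence)
def Claim_changed_clean_stream : Prop := Dom_clean_stream (pvDiffWitness_clean_stream) ∧ Pre_clean_stream (pvDiffWitness_clean_stream) ∧ D_clean_stream (pvDiffWitness_clean_stream) ∧ clean_stream (pvDiffWitness_clean_stream) = pvDiffWitnessOut_clean_stream.1 ∧ clean_stream_alt (pvDiffWitness_clean_stream) = pvDiffWitnessOut_clean_stream.2 ∧ pvDiffWitnessOut_clean_stream.1 ≠ pvDiffWitnessOut_clean_stream.2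
def Claim_exact_clean_stream : Prop := ∀ (sequence : String), Dom_clean_stream sequence → Pre_clean_stream sequence → D_clean_stream sequence → clean_stream sequence ≠ clean_stream_alt sequence

-- ===== LEMMAS AND PROOFS =====

-- grammar view of a garbage section: consume its body ('!' escapes the next character),
-- return the rest of the stream after the closing '>' (none: unterminated).
def wfGarbage : List Char → Option (List Char)
  | [] => none
  | c :: r =>
    if c = '>' then some r
    else if c = '!' then
      match r with
      | [] => none
      | _ :: r₂ => wfGarbage r₂
    else wfGarbage r

-- position of the closing '>' inside the body, and the count of its garbage characters
def closeIdx : List Char → Nat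
  | [] => 0
  | c :: r =>
    if c = '>' then 0
    else if c = '!' then
      match r with
      | [] => 0
      | _ :: r₂ => closeIdx r₂ + 2
    else closeIdx r + 1

def gcount : List Char → Int
  | [] => 0
  | c :: r =>
    if c = '>' then 0
    else if c = '!' then
      match r with
      | [] => 0
      | _ :: r₂ => gcount r₂
    else gcount r + 1

-- unfold lemmas for the nested-match recursions (their auto-generated equations do not
-- apply as rewrite rules directly)
theorem wfGarbage_nil : wfGarbage [] = none := by rw [wfGarbage.eq_def]
theorem wfGarbage_cons (c : Char) (r : List Char) :
    wfGarbage (c :: r) = (if c = '>' then some r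
      else if c = '!' then
        match r with
        | [] => none
        | _ :: r₂ => wfGarbage r₂
      else wfGarbage r) := by rw [wfGarbage.eq_def]
theorem closeIdx_cons (c : Char) (r : List Char) :
    closeIdx (c :: r) = (if c = '>' then 0
      else if c = '!' then
        match r with
        | [] => 0
        | _ :: r₂ => closeIdx r₂ + 2
      else closeIdx r + 1) := by rw [closeIdx.eq_def]
theorem gcount_cons (c : Char) (r : List Char) :
    gcount (c :: r) = (if c = '>' then 0
      else if c = '!' then
        match r with
        | [] => 0
        | _ :: r₂ => gcount r₂
      else gcount r + 1) := by rw [gcount.eq_def]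

theorem wfGarbage_length_aux : ∀ (n : Nat) (r : List Char), r.length ≤ n → ∀ r',
    wfGarbage r = some r' → r'.length < r.length := by
  intro n
  induction n with
  | zero =>
    intro r hr r' h
    have : r = [] := by cases r <;> simp_all
    subst this; simp [wfGarbage_nil] at h
  | succ n ih =>
    intro r hr r' h
    cases r with
    | nil => simp [wfGarbage_nil] at h
    | cons c r₂ =>
      by_cases hc : c = '>'
      · simp [wfGarbage_cons, hc] at h
        subst h; simp
      · by_cases hb : c = '!'
        · cases r₂ with
          | nil => simp [wfGarbage_cons, hc, hb] at h
          | cons x r₃ =>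
            simp [wfGarbage_cons, hc, hb] at h
            have := ih r₃ (by simp at hr; omega) r' h
            simp; omega
        · simp [wfGarbage_cons, hc, hb] at h
          have := ih r₂ (by simp at hr; omega) r' h
          simp; omega

theorem wfGarbage_length (r r' : List Char) (h : wfGarbage r = some r') : r'.length < r.length :=
  wfGarbage_length_aux r.length r le_rfl r' h

-- A's skip corner as a scanner: true iff some garbage-closing unescaped '>' is immediately
-- followed by '<'
def skipScan : List Char → Bool → Bool → Bool
  | [], _, _ => false
  | c :: rest, in_g, esc =>
    if in_g then
      if esc then skipScan rest true false
      else if c = '!' then skipScan rest true true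
      else if c = '>' then (decide (rest.headD ' ' = '<')) || skipScan rest false false
      else skipScan rest true false
    else skipScan rest (c = '<') false

-- a terminated garbage body splits as b ++ '>' :: rest, with the length of b recorded by
-- closeIdx and the scan staying inside the garbage section across b
theorem wfGarbage_split : ∀ (n : Nat) (r : List Char), r.length ≤ n → ∀ r',
    wfGarbage r = some r' → ∃ b : List Char, r = b ++ '>' :: r' ∧ b.length = closeIdx r := by
  intro n
  induction n with
  | zero =>
    intro r hr r' h
    have : r = [] := by cases r <;> simp_all
    subst this; simp [wfGarbage_nil] at h
  | succ n ih =>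
    intro r hr r' h
    cases r with
    | nil => simp [wfGarbage_nil] at h
    | cons c r₂ =>
      by_cases hc : c = '>'
      · simp [wfGarbage_cons, hc] at h
        subst h; subst hc
        exact ⟨[], by simp, by simp [closeIdx_cons]⟩
      · by_cases hb : c = '!'
        · cases r₂ with
          | nil => simp [wfGarbage_cons, hc, hb] at h
          | cons x r₃ =>
            simp [wfGarbage_cons, hc, hb] at h
            obtain ⟨b, hb1, hb2⟩ := ih r₃ (by simp at hr; omega) r' h
            refine ⟨c :: x :: b, by simp [hb1], ?_⟩
            simp [closeIdx_cons, hc, hb, hb2]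
        · simp [wfGarbage_cons, hc, hb] at h
          obtain ⟨b, hb1, hb2⟩ := ih r₂ (by simp at hr; omega) r' h
          refine ⟨c :: b, by simp [hb1], ?_⟩
          simp [closeIdx_cons, hc, hb, hb2]

-- number of leading '!' of a list (applied to reversed prefixes: trailing '!' run)
def leadBang : List Char → Nat
  | [] => 0
  | c :: r => if c = '!' then leadBang r + 1 else 0

theorem leadBang_reverse_append (pre : List Char) (c : Char) :
    leadBang ((pre ++ [c]).reverse) = if c = '!' then leadBang pre.reverse + 1 else 0 := by
  simp [List.reverse_append, leadBang]

theorem getD_append_self (pre r : List Char) (d : Char) :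
    (pre ++ r).getD pre.length d = r.getD 0 d := by
  simp [List.getD_eq_getElem?_getD, List.getElem?_append_right (Nat.le_refl pre.length)]

theorem isValidFrom_append (pre r : List Char) : ∀ (n : Nat) (v : Bool), n ≤ pre.length →
    isValidFrom (pre ++ r) n v = isValidFrom pre n v := by
  intro n
  induction n with
  | zero => intro v _; rfl
  | succ n ih =>
    intro v hn
    have hg : (pre ++ r).getD n ' ' = pre.getD n ' ' := by
      simp [List.getD_eq_getElem?_getD, List.getElem?_append_left (by omega : n < pre.length)]
    simp only [isValidFrom, hg]
    by_cases hb : pre[n]?.getD ' ' = '!'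
    · simp [List.getD_eq_getElem?_getD, hb, ih (!v) (by omega)]
    · simp [List.getD_eq_getElem?_getD, hb]

theorem isValidFrom_spec (l : List Char) : ∀ (n : Nat) (v : Bool), n ≤ l.length →
    isValidFrom l n v = (if leadBang (l.take n).reverse = n then none
      else some (v == decide (leadBang (l.take n).reverse % 2 = 0))) := by
  intro n
  induction n with
  | zero => intro v _; simp [isValidFrom, leadBang]
  | succ n ih =>
    intro v hn
    have hlt : n < l.length := by omega
    have hget : l.getD n ' ' = l[n] := by
      simp [List.getD_eq_getElem?_getD, List.getElem?_eq_getElem hlt]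
    have htake : (l.take (n + 1)).reverse = l[n] :: (l.take n).reverse := by
      rw [List.take_succ]
      simp [List.getElem?_eq_getElem hlt]
    simp only [isValidFrom, hget, htake]
    by_cases hb : l[n] = '!'
    · have : (l[n] == '!') = true := by simp [hb]
      rw [if_pos this, ih (!v) (by omega)]
      simp only [leadBang, if_pos hb]
      by_cases he : leadBang (l.take n).reverse = n
      · rw [if_pos he, if_pos (by omega)]
      · rw [if_neg he, if_neg (by omega)]
        congr 1
        have hiff : ((leadBang (l.take n).reverse + 1) % 2 = 0) ↔
            ¬(leadBang (l.take n).reverse % 2 = 0) := by omega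
        by_cases hp : leadBang (l.take n).reverse % 2 = 0
        · have h1 : decide ((leadBang (l.take n).reverse + 1) % 2 = 0) = false := by
            simp; omega
          have h2 : decide (leadBang (l.take n).reverse % 2 = 0) = true := by simp [hp]
          rw [h1, h2]
          cases v <;> rfl
        · have h1 : decide ((leadBang (l.take n).reverse + 1) % 2 = 0) = true := by
            simp; omega
          have h2 : decide (leadBang (l.take n).reverse % 2 = 0) = false := by simp [hp]
          rw [h1, h2]
          cases v <;> rfl
    · have : (l[n] == '!') = false := by simp [hb]
      rw [if_neg (by simp [this])]
      simp only [leadBang, if_neg hb]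
      rw [if_neg (by omega)]
      simp

theorem isValid_at (pre r : List Char) (h2 : leadBang pre.reverse ≠ pre.length) :
    is_valid_char pre.length (pre ++ r) = some (decide (leadBang pre.reverse % 2 = 0)) := by
  unfold is_valid_char
  rw [isValidFrom_append pre r pre.length true le_rfl,
      isValidFrom_spec pre pre.length true le_rfl]
  rw [List.take_length] at *
  rw [if_neg h2]
  simp

-- A's inner loop over a terminated garbage body: finds the closing '>' and adds the body's count
theorem inner_spec : ∀ (fuel : Nat) (r : List Char), r.length ≤ fuel → ∀ r',
    wfGarbage r = some r' → ∀ (pre : List Char) (cnt : Int),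
    leadBang pre.reverse % 2 = 0 → leadBang pre.reverse ≠ pre.length →
    innerLoopF (pre ++ r) fuel pre.length cnt
      = (some (pre.length + closeIdx r), cnt + gcount r) := by
  intro fuel
  induction fuel using Nat.strong_induction_on with
  | _ fuel ih =>
    intro r hr r' h pre cnt hpar hne
    cases r with
    | nil => simp [wfGarbage_nil] at h
    | cons c r₂ =>
      obtain ⟨f, rfl⟩ : ∃ f, fuel = f + 1 := by
        cases fuel with
        | zero => simp at hr
        | succ f => exact ⟨f, rfl⟩
      have hlen : pre.length < (pre ++ c :: r₂).length := by simp
      have hget : (pre ++ c :: r₂).getD pre.length ' ' = c := by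
        rw [getD_append_self]; rfl
      have hval : is_valid_char pre.length (pre ++ c :: r₂) = some true := by
        rw [isValid_at pre _ hne]
        simp [hpar]
      rw [innerLoopF, if_pos hlen, hget, hval]
      by_cases hc : c = '>'
      · rw [if_pos (by simp [hc])]
        simp [closeIdx_cons, gcount_cons, hc]
      · rw [if_neg (by simp [hc])]
        by_cases hb : c = '!'
        · -- escape: the next character is consumed without counting or closing
          cases r₂ with
          | nil => simp [wfGarbage_cons, hc, hb] at h
          | cons x r₃ =>
            simp only [wfGarbage_cons, if_neg hc, if_pos hb] at h
            rw [if_neg (by simp [hb])]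
            obtain ⟨f', rfl⟩ : ∃ f', f = f' + 1 := by
              cases f with
              | zero => simp at hr
              | succ f' => exact ⟨f', rfl⟩
            -- second step, at index pre.length + 1, seen as pre₁ = pre ++ ['!']
            have e1 : pre ++ c :: x :: r₃ = (pre ++ [c]) ++ x :: r₃ := by simp
            have hl1 : (pre ++ [c]).length = pre.length + 1 := by simp
            have hlb1 : leadBang ((pre ++ [c]).reverse) = leadBang pre.reverse + 1 := by
              rw [leadBang_reverse_append, if_pos hb]
            have hlen1 : (pre ++ [c]).length < ((pre ++ [c]) ++ x :: r₃).length := by simp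
            have hget1 : ((pre ++ [c]) ++ x :: r₃).getD (pre ++ [c]).length ' ' = x := by
              rw [getD_append_self]; rfl
            have hval1 : is_valid_char (pre ++ [c]).length ((pre ++ [c]) ++ x :: r₃)
                = some false := by
              rw [isValid_at _ _ (by rw [hlb1, hl1]; omega)]
              rw [hlb1]
              simp [Nat.add_mod, hpar]
            rw [innerLoopF, e1, ← hl1]
            rw [if_pos hlen1, hget1, hval1]
            rw [if_neg (by simp), if_neg (by simp)]
            -- third step: pre₂ = pre ++ ['!', x]
            have e2 : (pre ++ [c]) ++ x :: r₃ = (pre ++ [c] ++ [x]) ++ r₃ := by simp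
            have hl2 : (pre ++ [c] ++ [x]).length = pre.length + 2 := by simp
            have hlb2 : leadBang ((pre ++ [c] ++ [x]).reverse)
                = if x = '!' then leadBang pre.reverse + 2 else 0 := by
              rw [leadBang_reverse_append]
              by_cases hx : x = '!'
              · rw [if_pos hx, if_pos hx, hlb1]
              · rw [if_neg hx, if_neg hx]
            have := ih f' (by omega) r₃ (by simp at hr; omega) r' h (pre ++ [c] ++ [x]) cnt
              (by rw [hlb2]; by_cases hx : x = '!' <;> simp [hx] <;> omega)
              (by rw [hlb2, hl2]; by_cases hx : x = '!' <;> simp [hx] <;> omega)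
            rw [hl2] at this
            rw [e2, show (pre ++ [c]).length + 1 = pre.length + 2 by simp, this]
            simp only [Prod.mk.injEq]
            constructor
            · congr 1
              simp only [closeIdx_cons, if_neg hc, if_pos hb]
              omega
            · simp only [gcount_cons, if_neg hc, if_pos hb]
        · -- ordinary garbage character: counted
          simp only [wfGarbage_cons, if_neg hc, if_neg hb] at h
          rw [if_pos (by simp [hb])]
          have e1 : pre ++ c :: r₂ = (pre ++ [c]) ++ r₂ := by simp
          have hl1 : (pre ++ [c]).length = pre.length + 1 := by simp
          have hlb1 : leadBang ((pre ++ [c]).reverse) = 0 := by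
            rw [leadBang_reverse_append, if_neg hb]
          have := ih f (by omega) r₂ (by simp at hr; omega) r' h (pre ++ [c]) (cnt + 1)
            (by rw [hlb1]) (by rw [hlb1, hl1]; omega)
          rw [hl1] at this
          rw [e1, this]
          simp only [Prod.mk.injEq]
          constructor
          · congr 1
            simp only [closeIdx_cons, if_neg hc, if_neg hb]
            omega
          · simp only [gcount_cons, if_neg hc, if_neg hb]
            ring

-- B's machine over a terminated garbage body
theorem alt_garbage : ∀ (n : Nat) (r : List Char), r.length ≤ n → ∀ r',
    wfGarbage r = some r' → ∀ (out : List Char) (cnt : Int),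
    altGo r true false out cnt = altGo r' false false out (cnt + gcount r) := by
  intro n
  induction n with
  | zero =>
    intro r hr r' h
    have : r = [] := by cases r <;> simp_all
    subst this; simp [wfGarbage_nil] at h
  | succ n ih =>
    intro r hr r' h out cnt
    cases r with
    | nil => simp [wfGarbage_nil] at h
    | cons c r₂ =>
      by_cases hc : c = '>'
      · simp [wfGarbage_cons, hc] at h
        subst h
        simp [altGo, hc, gcount_cons]
      · by_cases hb : c = '!'
        · cases r₂ with
          | nil => simp [wfGarbage_cons, hc, hb] at h
          | cons x r₃ =>
            simp only [wfGarbage_cons, if_neg hc, if_pos hb] at h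
            have step : altGo (c :: x :: r₃) true false out cnt = altGo r₃ true false out cnt := by
              simp [altGo, hb, hc]
            rw [step, ih r₃ (by simp at hr; omega) r' h out cnt]
            simp only [gcount_cons, if_neg hc, if_pos hb]
        · simp only [wfGarbage_cons, if_neg hc, if_neg hb] at h
          have step : altGo (c :: r₂) true false out cnt = altGo r₂ true false out (cnt + 1) := by
            simp [altGo, hb, hc]
          rw [step, ih r₂ (by simp at hr; omega) r' h out (cnt + 1)]
          have : cnt + 1 + gcount r₂ = cnt + gcount (c :: r₂) := by
            simp only [gcount_cons, if_neg hc, if_neg hb]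
            ring
          rw [this]

-- the Pre_ scanner agrees with its grammar view
theorem wfScan_garbage : ∀ (n : Nat) (r : List Char), r.length ≤ n →
    wfScan r true false = (match wfGarbage r with
      | none => false
      | some r' => wfScan r' false false) := by
  intro n
  induction n with
  | zero =>
    intro r hr
    have : r = [] := by cases r <;> simp_all
    subst this; simp [wfScan, wfGarbage_nil]
  | succ n ih =>
    intro r hr
    cases r with
    | nil => simp [wfScan, wfGarbage_nil]
    | cons c r₂ =>
      by_cases hc : c = '>'
      · simp [wfScan, wfGarbage_cons, hc]
      · by_cases hb : c = '!'
        · cases r₂ with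
          | nil => simp [wfScan, wfGarbage, hc, hb]
          | cons x r₃ =>
            have step : wfScan (c :: x :: r₃) true false = wfScan r₃ true false := by
              simp [wfScan, hb, hc]
            rw [step, ih r₃ (by simp at hr; omega)]
            simp [wfGarbage_cons, hc, hb]
        · have step : wfScan (c :: r₂) true false = wfScan r₂ true false := by
            simp [wfScan, hb, hc]
          rw [step, ih r₂ (by simp at hr; omega)]
          simp [wfGarbage_cons, hc, hb]

-- the skip scanner agrees with the grammar view of a garbage section
theorem skipScan_garbage : ∀ (n : Nat) (r : List Char), r.length ≤ n →
    skipScan r true false = (match wfGarbage r with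
      | none => false
      | some r' => (decide (r'.headD ' ' = '<')) || skipScan r' false false) := by
  intro n
  induction n with
  | zero =>
    intro r hr
    have : r = [] := by cases r <;> simp_all
    subst this; simp [skipScan, wfGarbage_nil]
  | succ n ih =>
    intro r hr
    cases r with
    | nil => simp [skipScan, wfGarbage_nil]
    | cons c r₂ =>
      by_cases hc : c = '>'
      · simp [skipScan, wfGarbage_cons, hc]
      · by_cases hb : c = '!'
        · cases r₂ with
          | nil => simp [skipScan, wfGarbage_cons, hc, hb]
          | cons x r₃ =>
            have step : skipScan (c :: x :: r₃) true false = skipScan r₃ true false := by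
              simp [skipScan, hb, hc]
            rw [step, ih r₃ (by simp at hr; omega)]
            simp [wfGarbage_cons, hc, hb]
        · have step : skipScan (c :: r₂) true false = skipScan r₂ true false := by
            simp [skipScan, hb, hc]
          rw [step, ih r₂ (by simp at hr; omega)]
          simp [wfGarbage_cons, hc, hb]

-- state 4 of the detector is absorbing
theorem dstep_absorb : ∀ (l : List Char), List.foldl dstep 4 l = 4 := by
  intro l
  induction l with
  | nil => rfl
  | cons c r ih => simp [dstep, ih]

-- if the skip scanner fires, the detector automaton reaches its absorbing state
-- (state codes: outside ↦ 0, in garbage ↦ 1, escaped ↦ 2)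
theorem skipScan_dstep : ∀ (l : List Char) (g e : Bool), skipScan l g e = true →
    List.foldl dstep (if g then if e then 2 else 1 else 0) l = 4 := by
  intro l
  induction l with
  | nil => intro g e h; simp [skipScan] at h
  | cons c rest ih =>
    intro g e h
    by_cases hg : g
    · by_cases he : e
      · have step : skipScan (c :: rest) true true = skipScan rest true false := by
          simp [skipScan]
        rw [hg, he] at h ⊢
        rw [step] at h
        have := ih true false h
        simpa [dstep] using this
      · have he' : e = false := by revert he; cases e <;> simp
        rw [hg, he'] at h ⊢
        by_cases hb : c = '!'
        · have step : skipScan (c :: rest) true false = skipScan rest true true := by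
            simp [skipScan, hb]
          rw [step] at h
          have := ih true true h
          simpa [dstep, hb] using this
        · by_cases hc : c = '>'
          · subst hc
            have step : skipScan ('>' :: rest) true false
                = ((decide (rest.headD ' ' = '<')) || skipScan rest false false) := by
              simp [skipScan, hb]
            rw [step] at h
            show List.foldl dstep (dstep 1 '>') rest = 4
            rw [show dstep 1 '>' = 3 by simp [dstep]]
            cases rest with
            | nil => simp [skipScan] at h
            | cons c' r₂ =>
              by_cases hc' : c' = '<'
              · show List.foldl dstep (dstep 3 c') r₂ = 4
                rw [show dstep 3 c' = 4 by simp [dstep, hc']]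
                exact dstep_absorb r₂
              · have hh : skipScan (c' :: r₂) false false = true := by
                  simp only [List.headD_cons] at h
                  simpa [hc'] using h
                have h2 := ih false false hh
                simp only [if_neg (by simp : ¬ (false : Bool) = true),
                  List.foldl_cons] at h2
                show List.foldl dstep (dstep 3 c') r₂ = 4
                rw [show dstep 3 c' = dstep 0 c' by simp [dstep, hc']]
                exact h2
          · have step : skipScan (c :: rest) true false = skipScan rest true false := by
              simp [skipScan, hb, hc]
            rw [step] at h
            have := ih true false h
            simpa [dstep, hb, hc] using this
    · have hg' : g = false := by revert hg; cases g <;> simp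
      rw [hg'] at h ⊢
      have step : skipScan (c :: rest) false e = skipScan rest (c = '<') false := by
        simp [skipScan]
      rw [step] at h
      have := ih (c = '<') false h
      by_cases hc : c = '<'
      · simpa [dstep, hc] using this
      · simpa [dstep, hc] using this

-- the outer loop with the cursor at or past the end returns immediately, whatever the fuel
theorem outer_exit (fuel : Nat) (s : List Char) (i : Nat) (cnt : Int) (h : ¬ i < s.length) :
    outerLoopF fuel s i cnt = (s, cnt) := by
  cases fuel with
  | zero => rfl
  | succ f => rw [outerLoopF, if_neg h]

-- the main invariant: outside the skip corner, A's loop over done ++ s (cursor at |done|) is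
-- B's machine on s with accumulated output `done`
theorem main_inv : ∀ (fuel : Nat) (s : List Char), s.length < fuel →
    wfScan s false false = true → skipScan s false false = false →
    ∀ (done : List Char) (cnt : Int),
    outerLoopF fuel (done ++ s) done.length cnt = altGo s false false done cnt := by
  intro fuel
  induction fuel using Nat.strong_induction_on with
  | _ fuel ih =>
    intro s hl hwf hsk done cnt
    cases s with
    | nil =>
      rw [outer_exit fuel (done ++ []) done.length cnt (by simp)]
      simp [altGo]
    | cons c s' =>
      obtain ⟨f, rfl⟩ : ∃ f, fuel = f + 1 := by
        cases fuel with
        | zero => simp at hl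
        | succ f => exact ⟨f, rfl⟩
      have hlen : done.length < (done ++ c :: s').length := by simp
      have hget : (done ++ c :: s').getD done.length ' ' = c := by
        rw [getD_append_self]; rfl
      rw [outerLoopF, if_pos hlen, hget]
      by_cases hc : c = '<'
      · rw [if_pos (by simp [hc])]
        have hwf1 : wfScan s' true false = true := by
          rw [show wfScan (c :: s') false false = wfScan s' true false by simp [wfScan, hc]] at hwf
          exact hwf
        have hsk1 : skipScan s' true false = false := by
          rw [show skipScan (c :: s') false false = skipScan s' true false by
            simp [skipScan, hc]] at hsk
          exact hsk
        rw [wfScan_garbage s'.length s' le_rfl] at hwf1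
        rw [skipScan_garbage s'.length s' le_rfl] at hsk1
        cases hg : wfGarbage s' with
        | none => rw [hg] at hwf1; simp at hwf1
        | some r' =>
          rw [hg] at hwf1 hsk1
          simp only at hwf1 hsk1
          simp only [Bool.or_eq_false_iff, decide_eq_false_iff_not] at hsk1
          obtain ⟨hhead, hskr⟩ := hsk1
          -- evaluate the inner loop via inner_spec with pre := done ++ ['<']
          have e1 : done ++ c :: s' = (done ++ [c]) ++ s' := by simp
          have hl1 : (done ++ [c]).length = done.length + 1 := by simp
          have hlb : leadBang ((done ++ [c]).reverse) = 0 := by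
            rw [leadBang_reverse_append, if_neg (by rw [hc]; decide)]
          have hinner : innerLoopF (done ++ c :: s') (done ++ c :: s').length
              (done.length + 1) cnt
              = (some (done.length + 1 + closeIdx s'), cnt + gcount s') := by
            rw [e1, ← hl1]
            exact inner_spec ((done ++ [c]) ++ s').length s' (by simp; omega) r' hg
              (done ++ [c]) cnt (by rw [hlb]) (by rw [hlb, hl1]; omega)
          rw [hinner]
          simp only
          -- the spliced string is done ++ r'
          obtain ⟨b, hb1, hb2⟩ := wfGarbage_split s'.length s' le_rfl r' hg
          have htake : (done ++ c :: s').take done.length = done := by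
            rw [List.take_left']
            simp
          have hdrop : (done ++ c :: s').drop (done.length + 1 + closeIdx s' + 1) = r' := by
            have e2 : done ++ c :: s' = (done ++ c :: b ++ ['>']) ++ r' := by
              rw [hb1]; simp
            have e3 : (done ++ c :: b ++ ['>']).length
                = done.length + 1 + closeIdx s' + 1 := by
              simp; omega
            rw [e2, ← e3, List.drop_left]
          rw [htake, hdrop]
          -- B's side: consume the garbage section
          have hB : altGo (c :: s') false false done cnt
              = altGo r' false false done (cnt + gcount s') := by
            have : altGo (c :: s') false false done cnt = altGo s' true false done cnt := by
              simp [altGo, hc]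
            rw [this, alt_garbage s'.length s' le_rfl r' hg done cnt]
          rw [hB]
          -- continue after the splice: the next character (if any) is not '<'
          cases r' with
          | nil =>
            rw [outer_exit f (done ++ []) (done.length + 1) _ (by simp)]
            simp [altGo]
          | cons c' r'' =>
            have hc' : ¬ (c' = '<') := by simpa using hhead
            have e4 : done ++ c' :: r'' = (done ++ [c']) ++ r'' := by simp
            have hl4 : (done ++ [c']).length = done.length + 1 := by simp
            have hwf'' : wfScan r'' false false = true := by
              rw [show wfScan (c' :: r'') false false = wfScan r'' false false by
                simp [wfScan, hc']] at hwf1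
              exact hwf1
            have hsk'' : skipScan r'' false false = false := by
              rw [show skipScan (c' :: r'') false false = skipScan r'' false false by
                simp [skipScan, hc']] at hskr
              exact hskr
            have hlen'' : r''.length < f := by
              have h1 := wfGarbage_length s' _ hg
              simp at hl h1
              omega
            rw [e4, ← hl4, ih f (by omega) r'' hlen'' hwf'' hsk'' (done ++ [c'])
              (cnt + gcount s')]
            simp [altGo, hc']
      · rw [if_neg (by simp [hc])]
        rw [show wfScan (c :: s') false false = wfScan s' false false by
          simp [wfScan, hc]] at hwf
        rw [show skipScan (c :: s') false false = skipScan s' false false by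
          simp [skipScan, hc]] at hsk
        have e1 : done ++ c :: s' = (done ++ [c]) ++ s' := by simp
        have hl1 : (done ++ [c]).length = done.length + 1 := by simp
        rw [e1, ← hl1, ih f (by omega) s' (by simp at hl; omega) hwf hsk (done ++ [c]) cnt]
        simp [altGo, hc]

-- ===== tightness: inside D_ the two programs always differ =====

-- soundness of the detector: reaching state 4 means the skip scanner fires
theorem dstep_sound : ∀ (l : List Char),
    (List.foldl dstep 0 l = 4 → skipScan l false false = true) ∧
    (List.foldl dstep 1 l = 4 → skipScan l true false = true) ∧
    (List.foldl dstep 2 l = 4 → skipScan l true true = true) ∧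
    (List.foldl dstep 3 l = 4 → l.headD ' ' = '<' ∨ skipScan l false false = true) := by
  intro l
  induction l with
  | nil => refine ⟨?_, ?_, ?_, ?_⟩ <;> intro h <;> simp at h
  | cons c r ih =>
    obtain ⟨ih0, ih1, ih2, ih3⟩ := ih
    refine ⟨?_, ?_, ?_, ?_⟩ <;> intro h
    · by_cases hc : c = '<'
      · rw [show List.foldl dstep 0 (c :: r) = List.foldl dstep 1 r by simp [dstep, hc]] at h
        rw [show skipScan (c :: r) false false = skipScan r true false by simp [skipScan, hc]]
        exact ih1 h
      · rw [show List.foldl dstep 0 (c :: r) = List.foldl dstep 0 r by simp [dstep, hc]] at h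
        rw [show skipScan (c :: r) false false = skipScan r false false by
          simp [skipScan, hc]]
        exact ih0 h
    · by_cases hg : c = '>'
      · rw [show List.foldl dstep 1 (c :: r) = List.foldl dstep 3 r by simp [dstep, hg]] at h
        rw [show skipScan (c :: r) true false
            = ((decide (r.headD ' ' = '<')) || skipScan r false false) by
          simp [skipScan, hg]]
        rcases ih3 h with hh | hh
        · simp only [List.headD_eq_head?_getD] at hh
          simp [hh]
        · simp [hh]
      · by_cases hb : c = '!'
        · rw [show List.foldl dstep 1 (c :: r) = List.foldl dstep 2 r by
            simp [dstep, hg, hb]] at h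
          rw [show skipScan (c :: r) true false = skipScan r true true by
            simp [skipScan, hg, hb]]
          exact ih2 h
        · rw [show List.foldl dstep 1 (c :: r) = List.foldl dstep 1 r by
            simp [dstep, hg, hb]] at h
          rw [show skipScan (c :: r) true false = skipScan r true false by
            simp [skipScan, hg, hb]]
          exact ih1 h
    · rw [show List.foldl dstep 2 (c :: r) = List.foldl dstep 1 r by simp [dstep]] at h
      rw [show skipScan (c :: r) true true = skipScan r true false by simp [skipScan]]
      exact ih1 h
    · by_cases hc : c = '<'
      · left; simp [hc]
      · rw [show List.foldl dstep 3 (c :: r) = List.foldl dstep 0 r by simp [dstep, hc]] at h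
        right
        rw [show skipScan (c :: r) false false = skipScan r false false by
          simp [skipScan, hc]]
        exact ih0 h

-- A's outer loop never changes the characters before its cursor
theorem outer_take : ∀ (fuel : Nat) (s : List Char) (i : Nat) (cnt : Int),
    (outerLoopF fuel s i cnt).1.take i = s.take i := by
  intro fuel
  induction fuel with
  | zero => intro s i cnt; rfl
  | succ f ih =>
    intro s i cnt
    rw [outerLoopF]
    by_cases hi : i < s.length
    · rw [if_pos hi]
      have step : ∀ (t : List Char) (c : Int), t.take i = s.take i →
          (outerLoopF f t (i + 1) c).1.take i = s.take i := by
        intro t c ht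
        have h1 := ih t (i + 1) c
        calc (outerLoopF f t (i + 1) c).1.take i
            = ((outerLoopF f t (i + 1) c).1.take (i + 1)).take i := by
              rw [List.take_take]; simp [Nat.min_def]
          _ = (t.take (i + 1)).take i := by rw [h1]
          _ = t.take i := by rw [List.take_take]; simp [Nat.min_def]
          _ = s.take i := ht
      by_cases hc : (s.getD i ' ' == '<') = true
      · rw [if_pos hc]
        cases hm : innerLoopF s s.length (i + 1) cnt with
        | mk oj cnt' =>
          cases oj with
          | some j =>
            simp only
            refine step _ _ ?_
            rw [List.take_append_of_le_length (by rw [List.length_take]; omega), List.take_take]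
            simp [Nat.min_def]
          | none => exact step s cnt' rfl
      · rw [if_neg hc]
        exact step s cnt rfl
    · rw [if_neg hi]
  -- at or past the end the loop returns s itself

-- B's machine never emits '<'
theorem alt_no_lt : ∀ (l : List Char) (g e : Bool) (out : List Char) (cnt : Int),
    '<' ∉ out → '<' ∉ (altGo l g e out cnt).1 := by
  intro l
  induction l with
  | nil => intro g e out cnt h; exact h
  | cons ch rest ih =>
    intro g e out cnt h
    by_cases hg : g
    · by_cases he : e
      · rw [show altGo (ch :: rest) g e out cnt = altGo rest true false out cnt by
          simp [altGo, hg, he]]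
        exact ih _ _ _ _ h
      · by_cases hb : ch = '!'
        · rw [show altGo (ch :: rest) g e out cnt = altGo rest true true out cnt by
            simp [altGo, hg, he, hb]]
          exact ih _ _ _ _ h
        · by_cases hc : ch = '>'
          · rw [show altGo (ch :: rest) g e out cnt = altGo rest false false out cnt by
              simp [altGo, hg, he, hb, hc]]
            exact ih _ _ _ _ h
          · rw [show altGo (ch :: rest) g e out cnt = altGo rest true e out (cnt + 1) by
              simp [altGo, hg, he, hb, hc]]
            exact ih _ _ _ _ h
    · by_cases hc : ch = '<'
      · rw [show altGo (ch :: rest) g e out cnt = altGo rest true false out cnt by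
          simp [altGo, hg, hc]]
        exact ih _ _ _ _ h
      · rw [show altGo (ch :: rest) g e out cnt = altGo rest false e (out ++ [ch]) cnt by
          simp [altGo, hg, hc]]
        have hc2 : ¬ '<' = ch := fun hx => hc hx.symm
        exact ih _ _ _ _ (by simp [h, hc2])

-- under Pre_, if the skip corner occurs then A's loop keeps a '<' in its output
theorem main_skip : ∀ (fuel : Nat) (s : List Char), s.length < fuel →
    wfScan s false false = true → skipScan s false false = true →
    ∀ (done : List Char) (cnt : Int),
    '<' ∈ (outerLoopF fuel (done ++ s) done.length cnt).1 := by
  intro fuel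
  induction fuel using Nat.strong_induction_on with
  | _ fuel ih =>
    intro s hl hwf hsk done cnt
    cases s with
    | nil => simp [skipScan] at hsk
    | cons c s' =>
      obtain ⟨f, rfl⟩ : ∃ f, fuel = f + 1 := by
        cases fuel with
        | zero => simp at hl
        | succ f => exact ⟨f, rfl⟩
      have hlen : done.length < (done ++ c :: s').length := by simp
      have hget : (done ++ c :: s').getD done.length ' ' = c := by
        rw [getD_append_self]; rfl
      rw [outerLoopF, if_pos hlen, hget]
      by_cases hc : c = '<'
      · rw [if_pos (by simp [hc])]
        have hwf1 : wfScan s' true false = true := by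
          rw [show wfScan (c :: s') false false = wfScan s' true false by simp [wfScan, hc]] at hwf
          exact hwf
        have hsk1 : skipScan s' true false = true := by
          rw [show skipScan (c :: s') false false = skipScan s' true false by
            simp [skipScan, hc]] at hsk
          exact hsk
        rw [wfScan_garbage s'.length s' le_rfl] at hwf1
        rw [skipScan_garbage s'.length s' le_rfl] at hsk1
        cases hg : wfGarbage s' with
        | none => rw [hg] at hwf1; simp at hwf1
        | some r' =>
          rw [hg] at hwf1 hsk1
          simp only at hwf1 hsk1
          have e1 : done ++ c :: s' = (done ++ [c]) ++ s' := by simp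
          have hl1 : (done ++ [c]).length = done.length + 1 := by simp
          have hlb : leadBang ((done ++ [c]).reverse) = 0 := by
            rw [leadBang_reverse_append, if_neg (by rw [hc]; decide)]
          have hinner : innerLoopF (done ++ c :: s') (done ++ c :: s').length
              (done.length + 1) cnt
              = (some (done.length + 1 + closeIdx s'), cnt + gcount s') := by
            rw [e1, ← hl1]
            exact inner_spec ((done ++ [c]) ++ s').length s' (by simp; omega) r' hg
              (done ++ [c]) cnt (by rw [hlb]) (by rw [hlb, hl1]; omega)
          rw [hinner]
          simp only
          obtain ⟨b, hb1, hb2⟩ := wfGarbage_split s'.length s' le_rfl r' hg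
          have htake : (done ++ c :: s').take done.length = done := by
            rw [List.take_left']
            simp
          have hdrop : (done ++ c :: s').drop (done.length + 1 + closeIdx s' + 1) = r' := by
            have e2 : done ++ c :: s' = (done ++ c :: b ++ ['>']) ++ r' := by
              rw [hb1]; simp
            have e3 : (done ++ c :: b ++ ['>']).length
                = done.length + 1 + closeIdx s' + 1 := by
              simp; omega
            rw [e2, ← e3, List.drop_left]
          rw [htake, hdrop]
          cases r' with
          | nil => simp [skipScan] at hsk1
          | cons c' r'' =>
            by_cases hc' : c' = '<'
            · -- the skipped '<' sits before the cursor and is never touched again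
              have ht := outer_take f (done ++ c' :: r'') (done.length + 1) (cnt + gcount s')
              have hmem : '<' ∈ (outerLoopF f (done ++ c' :: r'')
                  (done.length + 1) (cnt + gcount s')).1.take (done.length + 1) := by
                rw [ht, show (done ++ c' :: r'').take (done.length + 1)
                    = done ++ ['<'] by rw [List.take_append]; simp [hc']]
                simp
              exact List.mem_of_mem_take hmem
            · have hh : skipScan (c' :: r'') false false = true := by
                simp only [List.headD_cons] at hsk1
                simpa [hc'] using hsk1
              have hwf'' : wfScan r'' false false = true := by
                rw [show wfScan (c' :: r'') false false = wfScan r'' false false by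
                  simp [wfScan, hc']] at hwf1
                exact hwf1
              have hsk'' : skipScan r'' false false = true := by
                rw [show skipScan (c' :: r'') false false = skipScan r'' false false by
                  simp [skipScan, hc']] at hh
                exact hh
              have hlen'' : r''.length < f := by
                have h1 := wfGarbage_length s' _ hg
                simp at hl h1
                omega
              have e4 : done ++ c' :: r'' = (done ++ [c']) ++ r'' := by simp
              have hl4 : (done ++ [c']).length = done.length + 1 := by simp
              rw [e4, ← hl4]
              exact ih f (by omega) r'' hlen'' hwf'' hsk'' (done ++ [c']) (cnt + gcount s')
      · rw [if_neg (by simp [hc])]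
        rw [show wfScan (c :: s') false false = wfScan s' false false by
          simp [wfScan, hc]] at hwf
        rw [show skipScan (c :: s') false false = skipScan s' false false by
          simp [skipScan, hc]] at hsk
        have e1 : done ++ c :: s' = (done ++ [c]) ++ s' := by simp
        have hl1 : (done ++ [c]).length = done.length + 1 := by simp
        rw [e1, ← hl1]
        exact ih f (by omega) s' (by simp at hl; omega) hwf hsk (done ++ [c]) cnt

-- ===== VERDICT =====

theorem clean_stream_spec : Claim_unchanged_clean_stream := by
  intro s _ hpre hnd
  have hsk : skipScan s.toList false false = false := by
    by_contra h
    have hT : skipScan s.toList false false = true := by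
      revert h; cases skipScan s.toList false false <;> simp
    have h4 := skipScan_dstep s.toList false false hT
    simp only [if_neg (by simp : ¬ (false : Bool) = true)] at h4
    exact hnd h4
  unfold clean_stream clean_stream_alt
  have := main_inv (s.toList.length + 1) s.toList (by omega) hpre hsk [] 0
  simp only [List.nil_append, List.length_nil] at this
  rw [this]

theorem clean_stream_changed : Claim_changed_clean_stream := by
  unfold Claim_changed_clean_stream; decide

theorem clean_stream_tight : Claim_exact_clean_stream := by
  intro s _ hpre hd
  have hskip : skipScan s.toList false false = true := (dstep_sound s.toList).1 hd
  have hA : '<' ∈ (outerLoopF (s.toList.length + 1) s.toList 0 0).1 := by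
    have := main_skip (s.toList.length + 1) s.toList (by omega) hpre hskip [] 0
    simpa using this
  have hB : '<' ∉ (altGo s.toList false false [] 0).1 :=
    alt_no_lt s.toList false false [] 0 (by simp)
  intro heq
  unfold clean_stream clean_stream_alt at heq
  have h1 := congrArg (fun p => p.1.toList) heq
  simp only [String.toList_ofList] at h1
  rw [h1] at hA
  exact hB hA
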